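-- pv_equiv track=rewrite | github.com/RifaDeen/symAD-ECNN | demo_app/backend/api.py | get_slice_indices_around
-- ===== SOURCE A (Python) =====
-- def get_slice_indices_around(center_idx: int, depth: int, k: int) -> list:
--     """
--     Return k slice indices centered around center_idx (clamped to [0, depth-1]).
--     k should be odd (5,7,9).
--     """
--     k = int(k)
--     if k <= 1:
--         return [int(center_idx)]
--     if k % 2 == 0:
--         k += 1
--
--     half = k // 2
--     idxs = [center_idx + i for i in range(-half, half + 1)]
--     idxs = [max(0, min(depth - 1, i)) for i in idxs]
--
--     # remove duplicates if clamped at edges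
--     idxs_unique = []
--     for i in idxs:
--         if i not in idxs_unique:
--             idxs_unique.append(i)
--
--     return idxs_unique
-- ===== SOURCE B (Python) =====
-- def get_slice_indices_around(center_idx: int, depth: int, k: int) -> list:
--     k = int(k)
--     if k <= 1:
--         return [int(center_idx)]
--     if k % 2 == 0:
--         k += 1
--     half = k // 2
--     lo = max(0, min(depth - 1, center_idx - half))
--     hi = max(0, min(depth - 1, center_idx + half))
--     return list(range(lo, hi + 1))
-- ===== Notes on version B (the rewrite author's own statement) =====
-- stated objective: faster
-- what changed: Instead of materialising the k-wide window, clamping each element and deduplicating with a quadratic membership scan, B computes the two clamped endpoints in O(1) and returns the contiguous range between them (the clamped window is monotone 1-Lipschitz, so its distinct values are exactly lo..hi).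
import Mathlib
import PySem

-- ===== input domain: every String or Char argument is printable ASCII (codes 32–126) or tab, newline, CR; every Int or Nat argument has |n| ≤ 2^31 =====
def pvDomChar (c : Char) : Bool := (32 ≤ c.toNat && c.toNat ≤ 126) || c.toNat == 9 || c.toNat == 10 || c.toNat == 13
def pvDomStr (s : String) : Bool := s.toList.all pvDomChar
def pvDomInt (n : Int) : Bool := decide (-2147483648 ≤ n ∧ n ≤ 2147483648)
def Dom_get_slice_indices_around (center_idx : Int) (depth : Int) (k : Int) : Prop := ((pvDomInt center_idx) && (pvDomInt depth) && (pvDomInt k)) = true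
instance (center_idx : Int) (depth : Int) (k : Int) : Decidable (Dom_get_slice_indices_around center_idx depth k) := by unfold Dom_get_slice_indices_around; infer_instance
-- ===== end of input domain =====

-- B replaces A's build/clamp/dedup pipeline by computing the two clamped endpoints and
-- returning the contiguous range between them (simpler decomposition, same values).

-- ===== PORT A =====
def get_slice_indices_around (center_idx : Int) (depth : Int) (k : Int) : List Int :=
  if k ≤ 1 then [center_idx]
  else
    let k2 := if PySem.Int.mod k 2 = 0 then k + 1 else k
    let half := PySem.Int.floordiv k2 2
    let idxs := (PySem.List.pyRange (-half) (half + 1) 1).map (fun i => center_idx + i)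
    let idxs2 := idxs.map (fun i => max 0 (min (depth - 1) i))
    idxs2.foldl (fun acc i => if i ∈ acc then acc else acc ++ [i]) []

-- ===== PORT B =====
def get_slice_indices_around_alt (center_idx : Int) (depth : Int) (k : Int) : List Int :=
  if k ≤ 1 then [center_idx]
  else
    let k2 := if PySem.Int.mod k 2 = 0 then k + 1 else k
    let half := PySem.Int.floordiv k2 2
    let lo := max 0 (min (depth - 1) (center_idx - half))
    let hi := max 0 (min (depth - 1) (center_idx + half))
    PySem.List.pyRange lo (hi + 1) 1

-- ===== PRECONDITION & SPEC =====
def Spec_get_slice_indices_around (center_idx : Int) (depth : Int) (k : Int) (out : List Int) : Prop := out = get_slice_indices_around_alt center_idx depth k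
instance (center_idx : Int) (depth : Int) (k : Int) (out : List Int) : Decidable (Spec_get_slice_indices_around center_idx depth k out) := by unfold Spec_get_slice_indices_around; infer_instance

-- ===== CLAIM (what is proved, stated in full; the proofs are below) =====
def Claim_equal_get_slice_indices_around : Prop := ∀ (center_idx : Int) (depth : Int) (k : Int), Dom_get_slice_indices_around center_idx depth k → Spec_get_slice_indices_around center_idx depth k (get_slice_indices_around center_idx depth k)

-- ===== LEMMAS AND PROOFS =====

-- Deduplicating (first occurrence kept) the image of a contiguous integer range under a
-- monotone 1-Lipschitz map yields the contiguous range between the images of the endpoints.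
theorem dedup_map_pyRange (f : Int → Int)
    (hm : ∀ x y : Int, x ≤ y → f x ≤ f y) (hl : ∀ x : Int, f (x + 1) ≤ f x + 1) (a : Int) :
    ∀ n : Nat,
      ((PySem.List.pyRange a (a + 1 + n) 1).map f).foldl
          (fun acc i => if i ∈ acc then acc else acc ++ [i]) []
        = PySem.List.pyRange (f a) (f (a + n) + 1) 1 := by
  intro n
  induction n with
  | zero =>
      simp [PySem.List.pyRange_one_singleton]
  | succ n ih =>
      have hstep : a + 1 + ((n + 1 : Nat) : Int) = (a + 1 + (n : Int)) + 1 := by push_cast; ring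
      rw [hstep, PySem.List.pyRange_one_succ_right (by omega), List.map_append, List.foldl_append, ih]
      have hmono : f (a + n) ≤ f (a + 1 + n) := hm _ _ (by omega)
      have hfa : f a ≤ f (a + n) := hm _ _ (by omega)
      have hlip : f (a + 1 + n) ≤ f (a + n) + 1 := by
        have := hl (a + n); simpa [add_comm, add_left_comm, add_assoc] using this
      have hcast : a + ((n + 1 : Nat) : Int) = a + 1 + (n : Int) := by push_cast; ring
      rw [hcast]
      by_cases hx : f (a + 1 + n) ≤ f (a + n)
      · have heq : f (a + 1 + n) = f (a + n) := le_antisymm hx hmono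
        have hmem : f (a + 1 + n) ∈ PySem.List.pyRange (f a) (f (a + n) + 1) 1 := by
          rw [PySem.List.mem_pyRange_one]; omega
        simp only [List.map_cons, List.map_nil, List.foldl_cons, List.foldl_nil, if_pos hmem]
        rw [heq]
      · have heq : f (a + 1 + n) = f (a + n) + 1 := by omega
        have hmem : f (a + 1 + n) ∉ PySem.List.pyRange (f a) (f (a + n) + 1) 1 := by
          rw [PySem.List.mem_pyRange_one]; omega
        simp only [List.map_cons, List.map_nil, List.foldl_cons, List.foldl_nil, if_neg hmem]
        rw [heq]
        conv_rhs => rw [PySem.List.pyRange_one_succ_right (show f a ≤ f (a + (n : Int)) + 1 by omega)]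

-- ===== VERDICT (by name: the statement is the Claim_ definition above) =====
theorem get_slice_indices_around_spec : Claim_equal_get_slice_indices_around := by
  intro c d k _
  unfold Spec_get_slice_indices_around get_slice_indices_around get_slice_indices_around_alt
  by_cases hk : k ≤ 1
  · simp [hk]
  · simp only [if_neg hk]
    set k2 := if PySem.Int.mod k 2 = 0 then k + 1 else k with hk2
    set half := PySem.Int.floordiv k2 2 with hhalf
    have hk2ge : 2 ≤ k2 := by rw [hk2]; split <;> omega
    have h0 : 0 ≤ half := by
      rw [hhalf, PySem.Int.floordiv_eq_ediv_of_pos (by omega)]; omega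
    have hm : ∀ x y : Int, x ≤ y → (fun i => max 0 (min (d - 1) (c + i))) x ≤ (fun i => max 0 (min (d - 1) (c + i))) y := by
      intro x y h; simp only; omega
    have hl : ∀ x : Int, (fun i => max 0 (min (d - 1) (c + i))) (x + 1) ≤ (fun i => max 0 (min (d - 1) (c + i))) x + 1 := by
      intro x; simp only; omega
    have key := dedup_map_pyRange (fun i => max 0 (min (d - 1) (c + i))) hm hl (-half) (2 * half).toNat
    have hn : (((2 * half).toNat : Nat) : Int) = 2 * half := Int.toNat_of_nonneg (by omega)
    rw [hn] at key
    have e1 : -half + 1 + 2 * half = half + 1 := by ring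
    have e2 : -half + 2 * half = half := by ring
    rw [e1, e2] at key
    simp only [List.map_map, Function.comp_def] at *
    rw [key]
    have e3 : c + -half = c - half := by ring
    rw [e3]
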